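-- pv_equiv track=rewrite | github.com/olsenw/LeetCodeExercises | Python3/rearranging_fruits.py | minCost_fails
-- ===== SOURCE A (Python) =====
-- from collections import Counter
-- from typing import List, Dict, Set, Optional
--
-- def minCost_fails(basket1: List[int], basket2: List[int]) -> int:
--     basket1 = Counter(basket1)
--     basket2 = Counter(basket2)
--     left = []
--     right = []
--     for i in set(basket1).union(basket2):
--         if (basket1[i] + basket2[i]) % 2:
--             return -1
--         if basket1[i] < basket2[i]:
--             for j in range((basket2[i] - basket1[i]) // 2):
--                 right.append(i)
--         elif basket1[i] > basket2[i]: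
--             for j in range((basket1[i] - basket2[i]) // 2):
--                 left.append(i)
--     left.sort()
--     right.sort()
--     answer = 0
--     i,j = 0, 0
--     x,y = len(left) - 1, len(right) - 1
--     while i <= x and j <= y:
--         if left[i] < right[j]:
--             answer += left[i]
--             i += 1
--             y -= 1
--         else:
--             answer += right[j]
--             j += 1
--             x -= 1
--     return answer
-- ===== SOURCE B (Python) =====
-- from collections import Counter
--
-- def minCost_fails(basket1, basket2):
--     diff = Counter(basket1)
--     diff.subtract(basket2)
--     if any(d % 2 for d in diff.values()):
--         return -1
--     surplus = []
--     extra1 = extra2 = 0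
--     for v, d in diff.items():
--         h = abs(d) // 2
--         surplus.extend([v] * h)
--         if d > 0:
--             extra1 += h
--         else:
--             extra2 += h
--     surplus.sort()
--     return sum(surplus[:min(extra1, extra2)])
-- ===== Notes on version B (the rewrite author's own statement) =====
-- stated objective: alternative
-- what changed: B replaces A's per-element surplus lists, two separate sorts and index-based two-pointer merge loop by one signed difference Counter, a single combined sorted surplus list and the closed characterization 'sum of the min(extra1, extra2) smallest surplus elements' as a prefix sum.
import Mathlib
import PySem

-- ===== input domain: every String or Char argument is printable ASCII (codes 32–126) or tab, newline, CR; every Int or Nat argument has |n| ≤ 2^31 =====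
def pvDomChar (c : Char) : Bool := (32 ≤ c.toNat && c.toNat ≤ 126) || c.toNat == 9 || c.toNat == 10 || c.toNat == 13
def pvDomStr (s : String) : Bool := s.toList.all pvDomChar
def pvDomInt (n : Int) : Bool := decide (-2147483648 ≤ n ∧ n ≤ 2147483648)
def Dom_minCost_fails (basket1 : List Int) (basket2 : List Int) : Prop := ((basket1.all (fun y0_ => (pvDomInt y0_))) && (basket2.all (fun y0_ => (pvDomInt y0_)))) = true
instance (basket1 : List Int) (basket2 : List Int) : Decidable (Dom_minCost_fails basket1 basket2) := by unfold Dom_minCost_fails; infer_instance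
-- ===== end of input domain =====

-- B replaces A's two sorts + index-based two-pointer merge loop by one aggregated difference
-- counter and the sum of a prefix of the single sorted surplus list (objective: alternative).

-- ===== PORT A =====
-- the for-loop over set(basket1).union(basket2): builds the left/right surplus lists;
-- none is the 'return -1' path
def pvBuildLR (c1 c2 : PySem.Dict Int Int) :
    List Int → List Int → List Int → Option (List Int × List Int)
  | [], left, right => some (left, right)
  | i :: rest, left, right =>
    if PySem.Int.mod (c1.getD i 0 + c2.getD i 0) 2 ≠ 0 then none
    else if c1.getD i 0 < c2.getD i 0 then
      pvBuildLR c1 c2 rest left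
        ((PySem.List.pyRange 0 (PySem.Int.floordiv (c2.getD i 0 - c1.getD i 0) 2) 1).foldl
          (fun acc _ => acc ++ [i]) right)
    else if c2.getD i 0 < c1.getD i 0 then
      pvBuildLR c1 c2 rest
        ((PySem.List.pyRange 0 (PySem.Int.floordiv (c1.getD i 0 - c2.getD i 0) 2) 1).foldl
          (fun acc _ => acc ++ [i]) left) right
    else pvBuildLR c1 c2 rest left right

-- the while-loop; left[i]/right[j] are always in range when the loop body runs, so the
-- IndexError branch of pyGet? (its none, read through .getD 0) is never taken
def pvMergeLoop (left right : List Int) (i j x y answer : Int) : Int :=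
  if h : i ≤ x ∧ j ≤ y then
    let li := (PySem.List.pyGet? left i).getD 0
    let rj := (PySem.List.pyGet? right j).getD 0
    if li < rj then pvMergeLoop left right (i + 1) j x (y - 1) (answer + li)
    else pvMergeLoop left right i (j + 1) (x - 1) y (answer + rj)
  else answer
termination_by ((x - i) + (y - j) + 2).toNat
decreasing_by all_goals omega

def minCost_fails (basket1 : List Int) (basket2 : List Int) : Int :=
  let c1 := PySem.Dict.counter basket1
  let c2 := PySem.Dict.counter basket2
  match pvBuildLR c1 c2 (PySem.Set.union (PySem.Set.ofList c1.keys) c2.keys) [] [] with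
  | none => -1
  | some (left, right) =>
    let l := PySem.List.sorted left (fun x => x)
    let r := PySem.List.sorted right (fun x => x)
    pvMergeLoop l r 0 0 ((l.length : Int) - 1) ((r.length : Int) - 1) 0

-- ===== PORT B =====
def minCost_fails_alt (basket1 : List Int) (basket2 : List Int) : Int :=
  let diff := basket2.foldl (fun d x => d.modify x 0 (fun c => c - 1)) (PySem.Dict.counter basket1)
  if diff.values.any (fun d => PySem.Int.mod d 2 != 0) then -1
  else
    let acc := diff.items.foldl
      (fun (acc : List Int × Int × Int) p =>
        let h := PySem.Int.floordiv |p.2| 2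
        (acc.1 ++ List.replicate h.toNat p.1,
         if 0 < p.2 then acc.2.1 + h else acc.2.1,
         if 0 < p.2 then acc.2.2 else acc.2.2 + h))
      ([], 0, 0)
    let s := PySem.List.sorted acc.1 (fun x => x)
    (PySem.List.slice s none (some (min acc.2.1 acc.2.2))).sum

-- ===== PRECONDITION & SPEC =====
def Spec_minCost_fails (basket1 : List Int) (basket2 : List Int) (out : Int) : Prop := out = minCost_fails_alt basket1 basket2
instance (basket1 : List Int) (basket2 : List Int) (out : Int) : Decidable (Spec_minCost_fails basket1 basket2 out) := by unfold Spec_minCost_fails; infer_instance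

-- ===== CLAIM (what is proved, stated in full; the proofs are below) =====
def Claim_equal_minCost_fails : Prop := ∀ (basket1 : List Int) (basket2 : List Int), Dom_minCost_fails basket1 basket2 → Spec_minCost_fails basket1 basket2 (minCost_fails basket1 basket2)

-- ===== LEMMAS AND PROOFS =====

def pvD (b1 b2 : List Int) (v : Int) : Int := (b1.count v : Int) - (b2.count v : Int)
def pvH (b1 b2 : List Int) (v : Int) : Nat := (pvD b1 b2 v).natAbs / 2
def pvLF (b1 b2 : List Int) (v : Int) : List Int :=
  if 0 < pvD b1 b2 v then List.replicate (pvH b1 b2 v) v else []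
def pvRF (b1 b2 : List Int) (v : Int) : List Int :=
  if pvD b1 b2 v < 0 then List.replicate (pvH b1 b2 v) v else []


lemma pv_update_add (s t : PySem.Set Int) (x : Int) :
    PySem.Set.update s (PySem.Set.add t x) = PySem.Set.add (PySem.Set.update s t) x := by
  by_cases hx : t.contains x = true
  · have hxt : x ∈ t := (PySem.Set.contains_iff t x).1 hx
    have hx2 : (PySem.Set.update s t).contains x = true :=
      (PySem.Set.contains_iff _ x).2 ((PySem.Set.mem_update s t x).2 (Or.inr hxt))
    have e1 : PySem.Set.add t x = t := by simp only [PySem.Set.add, hx, if_pos]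
    have e2 : PySem.Set.add (PySem.Set.update s t) x = PySem.Set.update s t := by
      simp only [PySem.Set.add, hx2, if_pos]
    rw [e1, e2]
  · have e1 : PySem.Set.add t x = t ++ [x] := by
      simp only [PySem.Set.add, if_neg hx]
    rw [e1]
    show (t ++ [x]).foldl PySem.Set.add s = _
    rw [List.foldl_append]
    rfl

lemma pv_update_update (xs : List Int) (s t : PySem.Set Int) :
    PySem.Set.update s (PySem.Set.update t xs) = PySem.Set.update (PySem.Set.update s t) xs := by
  induction xs generalizing t with
  | nil => rfl
  | cons x xs ih =>
    show PySem.Set.update s (PySem.Set.update (t.add x) xs) = PySem.Set.update _ xs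
    rw [ih (t.add x), pv_update_add]

lemma pv_keysA (b1 b2 : List Int) :
    PySem.Set.union (PySem.Set.ofList (PySem.Set.ofList b1)) (PySem.Set.ofList b2)
      = PySem.Set.update (PySem.Set.ofList b1) b2 := by
  have h1 : PySem.Set.ofList (PySem.Set.ofList b1) = PySem.Set.ofList b1 := by
    show PySem.Set.update PySem.Set.empty (PySem.Set.update PySem.Set.empty b1)
        = PySem.Set.update PySem.Set.empty b1
    rw [pv_update_update]
    rfl
  show PySem.Set.update (PySem.Set.ofList (PySem.Set.ofList b1)) (PySem.Set.update PySem.Set.empty b2) = _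
  rw [h1, pv_update_update]
  rfl

lemma pv_sub_getD (l : List Int) (d : PySem.Dict Int Int) (v : Int) :
    (l.foldl (fun d x => d.modify x 0 (fun c => c - 1)) d).getD v 0 = d.getD v 0 - l.count v := by
  induction l generalizing d with
  | nil => simp
  | cons x l ih =>
    rw [List.foldl_cons, ih]
    have h1 : (d.modify x 0 (fun c => c - 1)).getD v 0 =
        if v = x then d.getD x 0 - 1 else d.getD v 0 := by
      simp [PySem.Dict.modify, PySem.Dict.getD_insert]
    rw [h1, List.count_cons]
    by_cases h : v = x
    · subst h; simp; ring
    · have : (x == v) = false := by simp [Ne.symm h]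
      simp [h, this]

lemma pv_bfold (ps : List (Int × Int)) :
    ∀ (acc : List Int × Int × Int),
      ps.foldl
        (fun (acc : List Int × Int × Int) p =>
          let h := PySem.Int.floordiv |p.2| 2
          (acc.1 ++ List.replicate h.toNat p.1,
           if 0 < p.2 then acc.2.1 + h else acc.2.1,
           if 0 < p.2 then acc.2.2 else acc.2.2 + h))
        acc =
      (acc.1 ++ ps.flatMap (fun p => List.replicate (PySem.Int.floordiv |p.2| 2).toNat p.1),
       acc.2.1 + (ps.map (fun p => if 0 < p.2 then PySem.Int.floordiv |p.2| 2 else 0)).sum,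
       acc.2.2 + (ps.map (fun p => if 0 < p.2 then 0 else PySem.Int.floordiv |p.2| 2)).sum) := by
  induction ps with
  | nil => simp
  | cons p ps ih =>
    intro acc
    simp only [List.foldl_cons, ih, List.flatMap_cons, List.map_cons, List.sum_cons]
    refine Prod.ext ?_ (Prod.ext ?_ ?_) <;> simp
    · by_cases h : 0 < p.2 <;> simp [h] <;> ring
    · by_cases h : 0 < p.2 <;> simp [h] <;> ring

lemma pv_flatMap_split (ks : List Int) (f g : Int → List Int) :
    (ks.flatMap (fun v => f v ++ g v)).Perm (ks.flatMap f ++ ks.flatMap g) := by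
  induction ks with
  | nil => simp
  | cons k ks ih =>
    simp only [List.flatMap_cons]
    refine ((ih.append_left (f k ++ g k)).trans ?_)
    refine List.perm_iff_count.2 (fun a => ?_)
    simp only [List.count_append]
    omega
lemma pv_foldl_app_const {α β : Type} (m : List β) (v : α) :
    ∀ acc : List α, m.foldl (fun a _ => a ++ [v]) acc = acc ++ List.replicate m.length v := by
  induction m with
  | nil => simp
  | cons b m ih =>
    intro acc
    rw [List.foldl_cons, ih, List.append_assoc]
    rfl

lemma pv_length_pyRange (n : Int) : (PySem.List.pyRange 0 n 1).length = n.toNat := by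
  simp [PySem.List.pyRange]
  omega

lemma pv_range_rep (n : Int) (v : Int) (acc : List Int) :
    (PySem.List.pyRange 0 n 1).foldl (fun a _ => a ++ [v]) acc = acc ++ List.replicate n.toNat v := by
  rw [pv_foldl_app_const, pv_length_pyRange]

lemma pv_fd_toNat (a : Int) (h : 0 < a) : (PySem.Int.floordiv a 2).toNat = a.natAbs / 2 := by
  rw [PySem.Int.floordiv_eq_ediv_of_pos (by norm_num)]
  omega

lemma pv_buildLR_some (b1 b2 : List Int) :
    ∀ (ks left right : List Int),
      (∀ v ∈ ks, PySem.Int.mod ((b1.count v : Int) + (b2.count v : Int)) 2 = 0) →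
      pvBuildLR (PySem.Dict.counter b1) (PySem.Dict.counter b2) ks left right =
        some (left ++ ks.flatMap (pvLF b1 b2), right ++ ks.flatMap (pvRF b1 b2)) := by
  intro ks
  induction ks with
  | nil => intro left right _; simp [pvBuildLR]
  | cons v ks ih =>
    intro left right hall
    have hv := hall v (by simp)
    rw [pvBuildLR]
    simp only [PySem.Dict.getD_counter, hv, ne_eq, not_true_eq_false, not_false_eq_true, if_neg,
      List.flatMap_cons]
    have hrest : ∀ w ∈ ks, PySem.Int.mod ((b1.count w : Int) + (b2.count w : Int)) 2 = 0 :=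
      fun w hw => hall w (List.mem_cons_of_mem _ hw)
    rcases lt_trichotomy ((b1.count v : Int)) ((b2.count v : Int)) with hlt | heq | hgt
    · rw [if_pos hlt, pv_range_rep, ih _ _ hrest]
      have hL : pvLF b1 b2 v = [] := by
        simp [pvLF, pvD]; omega
      have hR : pvRF b1 b2 v = List.replicate (PySem.Int.floordiv ((b2.count v : Int) - (b1.count v : Int)) 2).toNat v := by
        rw [pv_fd_toNat _ (by omega)]
        have : ((b2.count v : Int) - (b1.count v : Int)).natAbs = (pvD b1 b2 v).natAbs := by
          unfold pvD; omega
        rw [this]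
        simp only [pvRF, pvH]
        rw [if_pos (by unfold pvD; omega)]
      rw [hL, hR]
      simp [List.append_assoc]
    · rw [if_neg (by omega), if_neg (by omega), ih _ _ hrest]
      have hL : pvLF b1 b2 v = [] := by simp [pvLF, pvD]; omega
      have hR : pvRF b1 b2 v = [] := by simp [pvRF, pvD]; omega
      rw [hL, hR]
      simp
    · rw [if_neg (by omega), if_pos hgt, pv_range_rep, ih _ _ hrest]
      have hR : pvRF b1 b2 v = [] := by simp [pvRF, pvD]; omega
      have hL : pvLF b1 b2 v = List.replicate (PySem.Int.floordiv ((b1.count v : Int) - (b2.count v : Int)) 2).toNat v := by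
        rw [pv_fd_toNat _ (by omega)]
        have : ((b1.count v : Int) - (b2.count v : Int)).natAbs = (pvD b1 b2 v).natAbs := by
          unfold pvD; omega
        rw [this]
        simp only [pvLF, pvH]
        rw [if_pos (by unfold pvD; omega)]
      rw [hL, hR]
      simp [List.append_assoc]

lemma pv_buildLR_none (b1 b2 : List Int) :
    ∀ (ks left right : List Int),
      (∃ v ∈ ks, PySem.Int.mod ((b1.count v : Int) + (b2.count v : Int)) 2 ≠ 0) →
      pvBuildLR (PySem.Dict.counter b1) (PySem.Dict.counter b2) ks left right = none := by
  intro ks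
  induction ks with
  | nil => intro _ _ h; simp at h
  | cons v ks ih =>
    intro left right hex
    rw [pvBuildLR]
    simp only [PySem.Dict.getD_counter]
    by_cases hv : PySem.Int.mod ((b1.count v : Int) + (b2.count v : Int)) 2 ≠ 0
    · rw [if_pos hv]
    · rw [if_neg hv]
      have hex' : ∃ w ∈ ks, PySem.Int.mod ((b1.count w : Int) + (b2.count w : Int)) 2 ≠ 0 := by
        rcases hex with ⟨w, hw, hodd⟩
        rcases List.mem_cons.1 hw with h | h
        · exact absurd (h ▸ hodd) hv
        · exact ⟨w, h, hodd⟩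
      split <;> [skip; split] <;> exact ih _ _ hex'

def pvG : List Int → List Int → Int
  | [], _ => 0
  | _ :: _, [] => 0
  | a :: l', b :: r' =>
    if a < b then a + pvG l' ((b :: r').dropLast)
    else b + pvG ((a :: l').dropLast) r'
termination_by l r => l.length + r.length
decreasing_by
  · simp [List.length_dropLast]; omega
  · simp [List.length_dropLast]; omega

lemma pvG_nil_right (w : List Int) : pvG w [] = 0 := by
  cases w <;> simp [pvG]

lemma pv_sorted_cons_min (a : Int) (xs : List Int) (h : ∀ x ∈ xs, a ≤ x) :
    PySem.List.sorted (a :: xs) (fun x => x) = a :: PySem.List.sorted xs (fun x => x) := by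
  refine List.Perm.eq_of_pairwise (le := fun u v => u ≤ v)
    (fun u v _ _ h1 h2 => le_antisymm h1 h2) ?_ ?_ ?_
  · exact PySem.List.sorted_pairwise (a :: xs) (fun x => x)
  · refine List.Pairwise.cons ?_ (PySem.List.sorted_pairwise xs (fun x => x))
    intro y hy
    exact h y ((PySem.List.mem_sorted xs _ false y).1 hy)
  · exact (PySem.List.sorted_perm (a :: xs) (fun x => x) false).trans
      ((PySem.List.sorted_perm xs (fun x => x) false).symm.cons a)

lemma pv_take_sum_perm_cons :
    ∀ (s s' : List Int) (e : Int) (k : Nat),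
      s.Pairwise (· ≤ ·) → s'.Pairwise (· ≤ ·) → s'.Perm (e :: s) →
      k ≤ (s.filter (fun x => decide (x ≤ e))).length →
      (s'.take k).sum = (s.take k).sum := by
  intro s
  induction s with
  | nil =>
    intro s' e k _ _ hp hk
    have hk0 : k = 0 := by simpa using hk
    subst hk0
    simp
  | cons c t ih =>
    intro s' e k hs hs' hp hk
    cases k with
    | zero => simp
    | succ k =>
      -- c ≤ e
      have hfilter : ∃ x ∈ c :: t, x ≤ e := by
        by_contra hno
        push Not at hno
        have : (c :: t).filter (fun x => decide (x ≤ e)) = [] := by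
          refine List.filter_eq_nil_iff.2 (fun x hx => by simp [hno x hx])
        rw [this] at hk
        simp at hk
      have hce : c ≤ e := by
        rcases hfilter with ⟨x, hx, hxe⟩
        rcases List.mem_cons.1 hx with h | h
        · exact h ▸ hxe
        · exact le_trans (List.rel_of_pairwise_cons hs h) hxe
      -- s' = c :: t' with t' ~ e :: t
      obtain ⟨h0, t', rfl⟩ : ∃ h0 t', s' = h0 :: t' := by
        cases s' with
        | nil => exact absurd hp.symm (by simp)
        | cons h0 t' => exact ⟨h0, t', rfl⟩
      have hc_min : ∀ x ∈ e :: c :: t, c ≤ x := by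
        intro x hx
        rcases List.mem_cons.1 hx with h | h
        · exact h ▸ hce
        · rcases List.mem_cons.1 h with h2 | h2
          · exact le_of_eq h2.symm
          · exact List.rel_of_pairwise_cons hs h2
      have hh0c : h0 = c := by
        have h1 : c ≤ h0 := hc_min h0 (hp.mem_iff.1 (List.mem_cons_self))
        have h2 : h0 ≤ c ∨ h0 = c := by
          have hcmem : c ∈ h0 :: t' := hp.mem_iff.2 (by simp)
          rcases List.mem_cons.1 hcmem with h | h
          · exact Or.inr h.symm
          · exact Or.inl (List.rel_of_pairwise_cons hs' h)
        rcases h2 with h | h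
        · exact le_antisymm h h1
        · exact h
      subst hh0c
      have hpt : t'.Perm (e :: t) := by
        have h2 : (h0 :: t').Perm (h0 :: e :: t) := hp.trans (List.Perm.swap h0 e t)
        exact h2.cons_inv
      have hkt : k ≤ (t.filter (fun x => decide (x ≤ e))).length := by
        have h3 : (h0 :: t).filter (fun x => decide (x ≤ e))
            = h0 :: t.filter (fun x => decide (x ≤ e)) := by
          simp [hce]
        rw [h3] at hk
        simpa using hk
      have h4 := ih t' e k hs.of_cons hs'.of_cons hpt hkt
      simp [List.take_succ_cons, h4]

lemma pv_pvG_eq (n : Nat) :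
    ∀ (l r : List Int), l.length + r.length ≤ n →
      l.Pairwise (· ≤ ·) → r.Pairwise (· ≤ ·) →
      pvG l r = ((PySem.List.sorted (l ++ r) (fun x => x)).take (min l.length r.length)).sum := by
  induction n with
  | zero =>
    intro l r hn _ _
    have : l = [] := by cases l <;> simp_all
    subst this
    simp [pvG]
  | succ n ih =>
    intro l r hn hl hr
    match l, r with
    | [], r => simp [pvG]
    | a :: l', [] => simp [pvG_nil_right]
    | a :: l', b :: r' =>
      rw [pvG]
      by_cases hab : a < b
      · rw [if_pos hab]
        -- a is minimal in the whole union
        have hmin : ∀ x ∈ l' ++ b :: r', a ≤ x := by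
          intro x hx
          rcases List.mem_append.1 hx with h | h
          · exact List.rel_of_pairwise_cons hl h
          · rcases List.mem_cons.1 h with h2 | h2
            · exact h2 ▸ le_of_lt hab
            · exact le_of_lt (lt_of_lt_of_le hab (List.rel_of_pairwise_cons hr h2))
        have hsortcons : PySem.List.sorted ((a :: l') ++ b :: r') (fun x => x)
            = a :: PySem.List.sorted (l' ++ b :: r') (fun x => x) := by
          rw [List.cons_append]
          exact pv_sorted_cons_min a _ hmin
        rw [hsortcons]
        have hminlen : min (a :: l').length (b :: r').length
            = min l'.length r'.length + 1 := by
          simp [Nat.succ_min_succ]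
        rw [hminlen, List.take_succ_cons, List.sum_cons]
        -- IH for l' and (b :: r').dropLast
        set rr := b :: r' with hrr
        have hrne : rr ≠ [] := by simp [hrr]
        set e := rr.getLast hrne with he
        have hsplit : rr.dropLast ++ [e] = rr := List.dropLast_append_getLast hrne
        have hlend : rr.dropLast.length = r'.length := by simp [hrr]
        have hihl : l'.Pairwise (· ≤ ·) := hl.of_cons
        have hihr : rr.dropLast.Pairwise (· ≤ ·) := by
          exact hr.sublist (List.dropLast_sublist rr)
        have hihn : l'.length + rr.dropLast.length ≤ n := by
          rw [hlend]
          simp [hrr] at hn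
          omega
        rw [ih l' rr.dropLast hihn hihl hihr, hlend]
        congr 1
        -- drop the maximal e of rr from the right summand
        have hde : ∀ x ∈ rr.dropLast, x ≤ e := by
          intro x hx
          have := hr
          rw [← hsplit] at this
          have h2 := (List.pairwise_append.1 this).2.2
          simpa using h2 x hx
        have hlen1 : (PySem.List.sorted (l' ++ rr.dropLast) (fun x => x)).Pairwise (· ≤ ·) :=
          PySem.List.sorted_pairwise _ _
        have hlen2 : (PySem.List.sorted (l' ++ rr) (fun x => x)).Pairwise (· ≤ ·) :=
          PySem.List.sorted_pairwise _ _
        have hperm : (PySem.List.sorted (l' ++ rr) (fun x => x)).Perm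
            (e :: PySem.List.sorted (l' ++ rr.dropLast) (fun x => x)) := by
          refine (PySem.List.sorted_perm (l' ++ rr) (fun x => x) false).trans ?_
          have p1 : (l' ++ rr).Perm (e :: (l' ++ rr.dropLast)) := by
            have h6 : l' ++ rr = (l' ++ rr.dropLast) ++ [e] := by
              rw [List.append_assoc, hsplit]
            rw [h6]
            exact List.perm_append_singleton e _
          refine p1.trans ?_
          exact ((PySem.List.sorted_perm (l' ++ rr.dropLast) (fun x => x) false).symm.cons e)
        have hcnt : min l'.length r'.length ≤
            ((PySem.List.sorted (l' ++ rr.dropLast) (fun x => x)).filter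
              (fun x => decide (x ≤ e))).length := by
          rw [← List.countP_eq_length_filter]
          rw [(PySem.List.sorted_perm (l' ++ rr.dropLast) (fun x => x) false).countP_eq]
          rw [List.countP_append]
          have : List.countP (fun x => decide (x ≤ e)) rr.dropLast = rr.dropLast.length :=
            List.countP_eq_length.2 (fun x hx => by simpa using hde x hx)
          omega
        exact (pv_take_sum_perm_cons _ _ e (min l'.length r'.length) hlen1 hlen2 hperm hcnt).symm
      · rw [if_neg hab]
        have hba : b ≤ a := le_of_not_gt hab
        have hmin : ∀ x ∈ (a :: l') ++ r', b ≤ x := by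
          intro x hx
          rcases List.mem_append.1 hx with h | h
          · rcases List.mem_cons.1 h with h2 | h2
            · exact h2 ▸ hba
            · exact le_trans hba (List.rel_of_pairwise_cons hl h2)
          · exact List.rel_of_pairwise_cons hr h
        have hsortcons : PySem.List.sorted ((a :: l') ++ b :: r') (fun x => x)
            = b :: PySem.List.sorted ((a :: l') ++ r') (fun x => x) := by
          have hp : ((a :: l') ++ b :: r').Perm (b :: ((a :: l') ++ r')) := List.perm_middle
          rw [PySem.List.sorted_eq_sorted_of_perm _ _ _ (fun x y h => h) hp]
          exact pv_sorted_cons_min b _ hmin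
        rw [hsortcons]
        have hminlen : min (a :: l').length (b :: r').length
            = min l'.length r'.length + 1 := by
          simp [Nat.succ_min_succ]
        rw [hminlen, List.take_succ_cons, List.sum_cons]
        set ll := a :: l' with hll
        have hlne : ll ≠ [] := by simp [hll]
        set e := ll.getLast hlne with he
        have hsplit : ll.dropLast ++ [e] = ll := List.dropLast_append_getLast hlne
        have hlend : ll.dropLast.length = l'.length := by simp [hll]
        have hihr : r'.Pairwise (· ≤ ·) := hr.of_cons
        have hihl : ll.dropLast.Pairwise (· ≤ ·) := hl.sublist (List.dropLast_sublist ll)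
        have hihn : ll.dropLast.length + r'.length ≤ n := by
          rw [hlend]
          simp [hll] at hn
          omega
        rw [ih ll.dropLast r' hihn hihl hihr, hlend]
        congr 1
        have hde : ∀ x ∈ ll.dropLast, x ≤ e := by
          intro x hx
          have h5 := hl
          rw [← hsplit] at h5
          have h2 := (List.pairwise_append.1 h5).2.2
          simpa using h2 x hx
        have hperm : (PySem.List.sorted (ll ++ r') (fun x => x)).Perm
            (e :: PySem.List.sorted (ll.dropLast ++ r') (fun x => x)) := by
          refine (PySem.List.sorted_perm (ll ++ r') (fun x => x) false).trans ?_
          have p1 : (ll ++ r').Perm (e :: (ll.dropLast ++ r')) := by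
            have h6 : ll ++ r' = ll.dropLast ++ (e :: r') := by
              rw [← hsplit]
              simp [List.append_assoc]
            rw [h6]
            exact List.perm_middle
          exact p1.trans ((PySem.List.sorted_perm (ll.dropLast ++ r') (fun x => x) false).symm.cons e)
        have hcnt : min l'.length r'.length ≤
            ((PySem.List.sorted (ll.dropLast ++ r') (fun x => x)).filter
              (fun x => decide (x ≤ e))).length := by
          rw [← List.countP_eq_length_filter]
          rw [(PySem.List.sorted_perm (ll.dropLast ++ r') (fun x => x) false).countP_eq]
          rw [List.countP_append]
          have : List.countP (fun x => decide (x ≤ e)) ll.dropLast = ll.dropLast.length :=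
            List.countP_eq_length.2 (fun x hx => by simpa using hde x hx)
          omega
        exact (pv_take_sum_perm_cons _ _ e (min l'.length r'.length) (PySem.List.sorted_pairwise _ _)
          (PySem.List.sorted_pairwise _ _) hperm hcnt).symm

lemma pv_win_cons (l : List Int) (i x : Int) (h0 : 0 ≤ i) (hix : i ≤ x) (hx : x < (l.length : Int)) :
    (l.drop i.toNat).take (x + 1 - i).toNat
      = l[i.toNat]'(by omega) :: ((l.drop (i + 1).toNat).take (x + 1 - (i + 1)).toNat) := by
  have hi : i.toNat < l.length := by omega
  rw [List.drop_eq_getElem_cons hi]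
  have h1 : (x + 1 - i).toNat = (x + 1 - (i + 1)).toNat + 1 := by omega
  have h2 : (i + 1).toNat = i.toNat + 1 := by omega
  rw [h1, h2, List.take_succ_cons]

lemma pv_win_dropLast (r : List Int) (j y : Int) (h0 : 0 ≤ j) (hjy : j ≤ y) (hy : y < (r.length : Int)) :
    (r.drop j.toNat).take (y - 1 + 1 - j).toNat
      = ((r.drop j.toNat).take (y + 1 - j).toNat).dropLast := by
  set s := r.drop j.toNat with hs
  have hslen : s.length = r.length - j.toNat := by simp [hs]
  have hK : (y + 1 - j).toNat ≤ s.length := by omega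
  rw [List.dropLast_eq_take, List.length_take, List.take_take]
  congr 1
  omega

lemma pv_mergeLoop_eq (n : Nat) :
    ∀ (l r : List Int) (i j x y ans : Int),
      ((x - i) + (y - j) + 2).toNat ≤ n →
      0 ≤ i → 0 ≤ j → x < (l.length : Int) → y < (r.length : Int) →
      pvMergeLoop l r i j x y ans =
        ans + pvG ((l.drop i.toNat).take (x + 1 - i).toNat) ((r.drop j.toNat).take (y + 1 - j).toNat) := by
  induction n with
  | zero =>
    intro l r i j x y ans hn h0i h0j hx hy
    rw [pvMergeLoop]
    have hg : ¬ (i ≤ x ∧ j ≤ y) := by omega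
    rw [dif_neg hg]
    rcases not_and_or.1 hg with h | h
    · have : (x + 1 - i).toNat = 0 := by omega
      rw [this]
      simp [pvG]
    · have : (y + 1 - j).toNat = 0 := by omega
      rw [this]
      simp [pvG_nil_right]
  | succ n ih =>
    intro l r i j x y ans hn h0i h0j hx hy
    rw [pvMergeLoop]
    by_cases hg : i ≤ x ∧ j ≤ y
    · rw [dif_pos hg]
      obtain ⟨hix, hjy⟩ := hg
      have hli : (PySem.List.pyGet? l i).getD 0 = l[i.toNat]'(by omega) := by
        exact PySem.List.pyGetD_eq_getElem l 0 h0i (by omega)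
      have hrj : (PySem.List.pyGet? r j).getD 0 = r[j.toNat]'(by omega) := by
        exact PySem.List.pyGetD_eq_getElem r 0 h0j (by omega)
      rw [pv_win_cons l i x h0i hix hx, pv_win_cons r j y h0j hjy hy]
      simp only [hli, hrj]
      by_cases hcmp : l[i.toNat]'(by omega) < r[j.toNat]'(by omega)
      · rw [if_pos hcmp]
        rw [ih l r (i + 1) j x (y - 1) _ (by omega) (by omega) h0j hx (by omega)]
        rw [pvG]
        rw [if_pos hcmp]
        rw [← pv_win_cons r j y h0j hjy hy]
        rw [pv_win_dropLast r j y h0j hjy hy]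
        ring
      · rw [if_neg hcmp]
        rw [ih l r i (j + 1) (x - 1) y _ (by omega) h0i (by omega) (by omega) hy]
        rw [pvG]
        rw [if_neg hcmp]
        rw [← pv_win_cons l i x h0i hix hx]
        rw [pv_win_dropLast l i x h0i hix hx]
        ring
    · rw [dif_neg hg]
      rcases not_and_or.1 hg with h | h
      · have : (x + 1 - i).toNat = 0 := by omega
        rw [this]
        simp [pvG]
      · have : (y + 1 - j).toNat = 0 := by omega
        rw [this]
        simp [pvG_nil_right]


-- pointwise facts connecting B's aggregated quantities with A's per-key lists
lemma pv_fd_abs (d : Int) : PySem.Int.floordiv |d| 2 = ((d.natAbs / 2 : Nat) : Int) := by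
  have h1 : |d| = ((d.natAbs : Nat) : Int) := Int.abs_eq_natAbs d
  rw [h1]
  exact_mod_cast PySem.Int.floordiv_natCast d.natAbs 2

lemma pv_repl_split (b1 b2 : List Int) (v : Int) :
    List.replicate (pvH b1 b2 v) v = pvLF b1 b2 v ++ pvRF b1 b2 v := by
  rcases lt_trichotomy (pvD b1 b2 v) 0 with h | h | h
  · simp [pvLF, pvRF, h, not_lt.2 (le_of_lt h), asymm h]
  · simp [pvLF, pvRF, h, pvH]
  · simp [pvLF, pvRF, h, not_lt.2 (le_of_lt h), asymm h]

lemma pv_lf_len (b1 b2 : List Int) (v : Int) :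
    (pvLF b1 b2 v).length = if 0 < pvD b1 b2 v then pvH b1 b2 v else 0 := by
  unfold pvLF
  split <;> simp

lemma pv_rf_len (b1 b2 : List Int) (v : Int) :
    (pvRF b1 b2 v).length = if 0 < pvD b1 b2 v then 0 else pvH b1 b2 v := by
  unfold pvRF
  rcases lt_trichotomy (pvD b1 b2 v) 0 with h | h | h
  · simp [h, asymm h]
  · simp [h, pvH]
  · simp [not_lt.2 (le_of_lt h), h]

-- ===== VERDICT (by name: the statement is the Claim_ definition above) =====
theorem minCost_fails_spec : Claim_equal_minCost_fails := by
  intro b1 b2 _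
  unfold Spec_minCost_fails
  -- shared data
  have hArg : PySem.Set.union (PySem.Set.ofList (PySem.Dict.counter b1).keys)
      (PySem.Dict.counter b2).keys = PySem.Set.update (PySem.Set.ofList b1) b2 := by
    rw [PySem.Dict.keys_counter, PySem.Dict.keys_counter, pv_keysA]
  set K := PySem.Set.update (PySem.Set.ofList b1) b2 with hKdef
  set diff := b2.foldl (fun d x => d.modify x 0 (fun c => c - 1)) (PySem.Dict.counter b1) with hdiff
  have hKeysB : diff.keys = K := by
    rw [hdiff, PySem.Dict.keys_foldl_modify b2 0 (fun _ _ => (fun c => c - 1)), PySem.Dict.keys_counter]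
  have hNodup : diff.keys.Nodup := by
    rw [hdiff]
    exact PySem.Dict.nodup_keys_foldl_modify_key b2 (fun x => x) 0
      (fun _ _ => (fun c => c - 1)) _ (PySem.Dict.nodup_keys_counter b1)
  have hgetD : ∀ v, diff.getD v 0 = pvD b1 b2 v := by
    intro v
    rw [hdiff, pv_sub_getD, PySem.Dict.getD_counter]
    rfl
  have hItems : diff.items = K.map (fun k => (k, pvD b1 b2 k)) := by
    rw [PySem.Dict.items_eq_map_keys diff hNodup 0, hKeysB]
    exact List.map_congr_left (fun k _ => by rw [hgetD])
  have hValues : diff.values = K.map (fun k => pvD b1 b2 k) := by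
    show diff.items.map (fun p => p.2) = _
    rw [hItems, List.map_map]
    rfl
  have hpar : ∀ v, PySem.Int.mod (pvD b1 b2 v) 2 ≠ 0 ↔
      PySem.Int.mod ((b1.count v : Int) + (b2.count v : Int)) 2 ≠ 0 := by
    intro v
    unfold pvD
    rw [Ne, Ne, PySem.Int.mod_eq_zero_iff_dvd, PySem.Int.mod_eq_zero_iff_dvd]
    omega
  have hBcond : (diff.values.any (fun d => PySem.Int.mod d 2 != 0) = true) ↔
      (∃ v ∈ K, PySem.Int.mod ((b1.count v : Int) + (b2.count v : Int)) 2 ≠ 0) := by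
    rw [hValues, List.any_map, List.any_eq_true]
    refine exists_congr (fun v => and_congr_right (fun _ => ?_))
    simp only [Function.comp, bne_iff_ne, ne_eq]
    exact hpar v
  by_cases hodd : ∃ v ∈ K, PySem.Int.mod ((b1.count v : Int) + (b2.count v : Int)) 2 ≠ 0
  · -- some value has odd total count: both return -1
    have hA : minCost_fails b1 b2 = -1 := by
      simp only [minCost_fails]
      rw [hArg, pv_buildLR_none b1 b2 K [] [] hodd]
    have hB : minCost_fails_alt b1 b2 = -1 := by
      simp only [minCost_fails_alt]
      rw [← hdiff, if_pos (hBcond.2 hodd)]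
    rw [hA, hB]
  · -- all totals even
    have heven : ∀ v ∈ K, PySem.Int.mod ((b1.count v : Int) + (b2.count v : Int)) 2 = 0 := by
      intro v hv
      by_contra hc
      exact hodd ⟨v, hv, hc⟩
    set left' := K.flatMap (pvLF b1 b2) with hldef
    set right' := K.flatMap (pvRF b1 b2) with hrdef
    set sl := PySem.List.sorted left' (fun x => x) with hsl
    set sr := PySem.List.sorted right' (fun x => x) with hsr
    have hA : minCost_fails b1 b2 =
        pvMergeLoop sl sr 0 0 ((sl.length : Int) - 1) ((sr.length : Int) - 1) 0 := by
      simp only [minCost_fails]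
      rw [hArg, pv_buildLR_some b1 b2 K [] [] heven]
      simp only [List.nil_append]
      rfl
    have hMerge : pvMergeLoop sl sr 0 0 ((sl.length : Int) - 1) ((sr.length : Int) - 1) 0
        = pvG sl sr := by
      rw [pv_mergeLoop_eq ((((sl.length : Int) - 1 - 0) + (((sr.length : Int) - 1) - 0) + 2).toNat)
        sl sr 0 0 ((sl.length : Int) - 1) ((sr.length : Int) - 1) 0 le_rfl le_rfl le_rfl
        (by omega) (by omega)]
      have h1 : ((sl.length : Int) - 1 + 1 - 0).toNat = sl.length := by omega
      have h2 : ((sr.length : Int) - 1 + 1 - 0).toNat = sr.length := by omega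
      rw [h1, h2]
      simp
    have hPairL : sl.Pairwise (· ≤ ·) := PySem.List.sorted_pairwise left' (fun x => x)
    have hPairR : sr.Pairwise (· ≤ ·) := PySem.List.sorted_pairwise right' (fun x => x)
    have hG : pvG sl sr =
        ((PySem.List.sorted (sl ++ sr) (fun x => x)).take (min sl.length sr.length)).sum :=
      pv_pvG_eq (sl.length + sr.length) sl sr le_rfl hPairL hPairR
    have hSortEq : PySem.List.sorted (sl ++ sr) (fun x => x)
        = PySem.List.sorted (left' ++ right') (fun x => x) := by
      refine PySem.List.sorted_eq_sorted_of_perm _ _ _ (fun _ _ h => h) ?_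
      exact (PySem.List.sorted_perm left' (fun x => x) false).append
        (PySem.List.sorted_perm right' (fun x => x) false)
    have hLenL : sl.length = left'.length := PySem.List.length_sorted _ _ _
    have hLenR : sr.length = right'.length := PySem.List.length_sorted _ _ _
    -- B's side
    have hBfalse : diff.values.any (fun d => PySem.Int.mod d 2 != 0) = false := by
      rw [← Bool.not_eq_true]
      intro hc
      exact hodd (hBcond.1 hc)
    have hB : minCost_fails_alt b1 b2 =
        (PySem.List.slice
          (PySem.List.sorted
            (K.flatMap (fun v => List.replicate (PySem.Int.floordiv |pvD b1 b2 v| 2).toNat v))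
            (fun x => x))
          none
          (some (min ((K.map (fun v => if 0 < pvD b1 b2 v then PySem.Int.floordiv |pvD b1 b2 v| 2 else 0)).sum)
                     ((K.map (fun v => if 0 < pvD b1 b2 v then 0 else PySem.Int.floordiv |pvD b1 b2 v| 2)).sum)))).sum := by
      simp only [minCost_fails_alt]
      rw [← hdiff, hBfalse]
      simp only [Bool.false_eq_true, if_false]
      rw [hItems, pv_bfold]
      simp only [List.nil_append, zero_add, List.flatMap_map, List.map_map]
      rfl
    -- identify B's pieces with left'/right'
    have hSurp : K.flatMap (fun v => List.replicate (PySem.Int.floordiv |pvD b1 b2 v| 2).toNat v)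
        = K.flatMap (fun v => pvLF b1 b2 v ++ pvRF b1 b2 v) := by
      refine congrArg (fun f => List.flatMap f K) (funext (fun v => ?_))
      rw [pv_fd_abs, Int.toNat_natCast, ← pv_repl_split]
      rfl
    have hSurpPerm : (K.flatMap (fun v => List.replicate (PySem.Int.floordiv |pvD b1 b2 v| 2).toNat v)).Perm
        (left' ++ right') := by
      rw [hSurp]
      exact pv_flatMap_split K (pvLF b1 b2) (pvRF b1 b2)
    have hSortB : PySem.List.sorted
        (K.flatMap (fun v => List.replicate (PySem.Int.floordiv |pvD b1 b2 v| 2).toNat v)) (fun x => x)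
        = PySem.List.sorted (left' ++ right') (fun x => x) :=
      PySem.List.sorted_eq_sorted_of_perm _ _ _ (fun _ _ h => h) hSurpPerm
    have hE1 : (K.map (fun v => if 0 < pvD b1 b2 v then PySem.Int.floordiv |pvD b1 b2 v| 2 else 0)).sum
        = (left'.length : Int) := by
      rw [hldef, List.length_flatMap]
      have h1 : K.map (fun v => if 0 < pvD b1 b2 v then PySem.Int.floordiv |pvD b1 b2 v| 2 else 0)
          = (K.map (fun v => if 0 < pvD b1 b2 v then pvH b1 b2 v else 0)).map (fun n : Nat => (n : Int)) := by
        rw [List.map_map]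
        refine List.map_congr_left (fun v _ => ?_)
        rw [pv_fd_abs]
        split <;> simp_all [pvH]
      rw [h1, ← Nat.cast_list_sum]
      exact congrArg (fun n : Nat => (n : Int))
        (congrArg List.sum (List.map_congr_left (fun v _ => pv_lf_len b1 b2 v)).symm)
    have hE2 : (K.map (fun v => if 0 < pvD b1 b2 v then 0 else PySem.Int.floordiv |pvD b1 b2 v| 2)).sum
        = (right'.length : Int) := by
      rw [hrdef, List.length_flatMap]
      have h1 : K.map (fun v => if 0 < pvD b1 b2 v then 0 else PySem.Int.floordiv |pvD b1 b2 v| 2)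
          = (K.map (fun v => if 0 < pvD b1 b2 v then 0 else pvH b1 b2 v)).map (fun n : Nat => (n : Int)) := by
        rw [List.map_map]
        refine List.map_congr_left (fun v _ => ?_)
        rw [pv_fd_abs]
        split <;> simp_all [pvH]
      rw [h1, ← Nat.cast_list_sum]
      exact congrArg (fun n : Nat => (n : Int))
        (congrArg List.sum (List.map_congr_left (fun v _ => pv_rf_len b1 b2 v)).symm)
    have hSlice : PySem.List.slice (PySem.List.sorted (left' ++ right') (fun x => x)) none
          (some (min ((left'.length : Int)) ((right'.length : Int))))
        = (PySem.List.sorted (left' ++ right') (fun x => x)).take (min left'.length right'.length) := by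
      rw [PySem.List.slice_to _ (by positivity)]
      congr 1
      omega
    rw [hA, hMerge, hG, hSortEq, hB, hSortB, hE1, hE2, hSlice, hLenL, hLenR]
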